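-- pv_equiv track=rewrite | github.com/totoLab/code-ingegneria-informatica | fondamentiDiInformatica1/simulazioni_esame/26062017/es2.py | azzera_duplicati
-- ===== SOURCE A (Python) =====
-- def azzera_duplicati(L1):
--     L2 = []
--     for x in L1:
--         if x not in L2:
--             L2.append(x)
--         else:
--             L2.append(0)
--     return L2
-- ===== SOURCE B (Python) =====
-- def azzera_duplicati(L1):
--     first = {}
--     for i, x in enumerate(L1):
--         first.setdefault(x, i)
--     return [x if first[x] == i else 0 for i, x in enumerate(L1)]
-- ===== Notes on version B (the rewrite author's own statement) =====
-- stated objective: faster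
-- what changed: Replaces the scan-and-test-membership-against-the-growing-output loop by two passes: one pass builds a first-occurrence index table with setdefault, a second pass maps each (index, value) to the value when its first index equals the index, else 0.
import Mathlib
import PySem

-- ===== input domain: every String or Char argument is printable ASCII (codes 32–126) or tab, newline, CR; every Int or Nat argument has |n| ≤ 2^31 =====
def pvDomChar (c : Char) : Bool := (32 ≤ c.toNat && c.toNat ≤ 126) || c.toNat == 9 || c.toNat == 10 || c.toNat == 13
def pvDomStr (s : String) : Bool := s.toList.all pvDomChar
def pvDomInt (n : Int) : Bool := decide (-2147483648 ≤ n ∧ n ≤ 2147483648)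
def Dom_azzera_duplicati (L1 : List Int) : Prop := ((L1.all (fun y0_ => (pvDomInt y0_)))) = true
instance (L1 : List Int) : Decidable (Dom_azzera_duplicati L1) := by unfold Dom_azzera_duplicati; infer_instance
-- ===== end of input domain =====

-- B replaces A's scan-with-membership-test-against-the-growing-output by two passes:
-- build a first-occurrence index table, then map each (index, value) by an index comparison.

-- ===== PORT A =====
-- for x in L1: if x not in L2: L2.append(x) else: L2.append(0)
def azzera_duplicati (L1 : List Int) : List Int :=
  L1.foldl (fun L2 x => if x ∉ L2 then L2 ++ [x] else L2 ++ [0]) []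

-- ===== PORT B =====
-- first pass: first.setdefault(x, i) over enumerate(L1)
def azzDupFirst (L1 : List Int) : PySem.Dict Int Int :=
  (PySem.List.enumerate L1).foldl (fun d p => d.setdefault p.2 p.1) PySem.Dict.empty

-- second pass: [x if first[x] == i else 0 for i, x in enumerate(L1)]  (first[x] is always present)
def azzera_duplicati_alt (L1 : List Int) : List Int :=
  let first := azzDupFirst L1
  (PySem.List.enumerate L1).map (fun p => if first.get? p.2 = some p.1 then p.2 else 0)

-- ===== PRECONDITION & SPEC =====
def Spec_azzera_duplicati (L1 : List Int) (out : List Int) : Prop := out = azzera_duplicati_alt L1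
instance (L1 : List Int) (out : List Int) : Decidable (Spec_azzera_duplicati L1 out) := by unfold Spec_azzera_duplicati; infer_instance

-- ===== CLAIM (what is proved, stated in full; the proofs are below) =====
def Claim_equal_azzera_duplicati : Prop := ∀ (L1 : List Int), Dom_azzera_duplicati L1 → Spec_azzera_duplicati L1 (azzera_duplicati L1)

-- ===== LEMMAS AND PROOFS =====

-- common reference recursion: emit x if not seen in the prefix `pre`, else 0
def azzDupGo (pre : List Int) : List Int → List Int
  | [] => []
  | x :: xs => (if x ∈ pre then 0 else x) :: azzDupGo (pre ++ [x]) xs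

-- A's loop equals the reference recursion, under the invariant relating the built list L2
-- (the prefix's fresh values plus inserted zeros) to the plain prefix `pre`.
theorem azzDup_foldl_eq (xs : List Int) : ∀ (L2 pre : List Int),
    (∀ y, y ∈ pre → y ∈ L2) → (∀ y, y ∈ L2 → y ∈ pre ∨ y = 0) →
    xs.foldl (fun L2 x => if x ∉ L2 then L2 ++ [x] else L2 ++ [0]) L2 = L2 ++ azzDupGo pre xs := by
  induction xs with
  | nil => intro L2 pre _ _; simp [azzDupGo]
  | cons x xs ih =>
    intro L2 pre h1 h2
    simp only [List.foldl_cons, azzDupGo]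
    by_cases hp : x ∈ pre
    · have hL : x ∈ L2 := h1 x hp
      rw [if_neg (by simp [hL]), if_pos hp,
        ih (L2 ++ [0]) (pre ++ [x])
          (by intro y hy; rcases List.mem_append.1 hy with h | h
              · exact List.mem_append_left _ (h1 y h)
              · simp at h; subst h; exact List.mem_append_left _ hL)
          (by intro y hy; rcases List.mem_append.1 hy with h | h
              · rcases h2 y h with h' | h'
                · exact Or.inl (List.mem_append_left _ h')
                · exact Or.inr h'
              · simp at h; exact Or.inr h)]
      simp
    · rw [if_neg hp]
      by_cases hL : x ∈ L2
      · have hx0 : x = 0 := (h2 x hL).resolve_left hp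
        rw [if_neg (by simp [hL]),
          ih (L2 ++ [0]) (pre ++ [x])
            (by intro y hy; rcases List.mem_append.1 hy with h | h
                · exact List.mem_append_left _ (h1 y h)
                · simp at h; subst h; rw [hx0]; simp)
            (by intro y hy; rcases List.mem_append.1 hy with h | h
                · rcases h2 y h with h' | h'
                  · exact Or.inl (List.mem_append_left _ h')
                  · exact Or.inr h'
                · simp at h; exact Or.inr h)]
        rw [hx0]; simp
      · rw [if_pos (by simp [hL]),
          ih (L2 ++ [x]) (pre ++ [x])
            (by intro y hy; rcases List.mem_append.1 hy with h | h
                · exact List.mem_append_left _ (h1 y h)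
                · simp at h; subst h; simp)
            (by intro y hy; rcases List.mem_append.1 hy with h | h
                · rcases h2 y h with h' | h'
                  · exact Or.inl (List.mem_append_left _ h')
                  · exact Or.inr h'
                · simp at h; subst h; left; simp)]
        simp

-- get? after appending a pair whose key is not yet present
theorem azzDup_get?_append_self {κ ν : Type} [BEq κ] [LawfulBEq κ]
    (l : List (κ × ν)) (k : κ) (v : ν)
    (h : (PySem.Dict.mk l).get? k = none) :
    (PySem.Dict.mk (l ++ [(k, v)])).get? k = some v := by
  induction l with
  | nil => simp [PySem.Dict.get?_mk_cons]
  | cons p rest ih =>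
    rw [List.cons_append, PySem.Dict.get?_mk_cons]
    rw [PySem.Dict.get?_mk_cons] at h
    by_cases hk : (p.1 == k) = true
    · simp [hk] at h
    · rw [if_neg hk] at h ⊢
      exact ih h

-- get? after appending a pair with a different key
theorem azzDup_get?_append_of_ne {κ ν : Type} [BEq κ] [LawfulBEq κ]
    (l : List (κ × ν)) (k : κ) (v : ν) (k' : κ) (h : k' ≠ k) :
    (PySem.Dict.mk (l ++ [(k, v)])).get? k' = (PySem.Dict.mk l).get? k' := by
  induction l with
  | nil => simp [PySem.Dict.get?, Ne.symm h]
  | cons p rest ih =>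
    rw [List.cons_append, PySem.Dict.get?_mk_cons, PySem.Dict.get?_mk_cons, ih]

-- the setdefault loop builds the first-occurrence table
theorem azzDup_fold_setdefault_get? (xs : List Int) : ∀ (s : Int) (d : PySem.Dict Int Int) (v : Int),
    ((PySem.List.enumerate xs s).foldl (fun d p => d.setdefault p.2 p.1) d).get? v
      = match d.get? v with
        | some w => some w
        | none => if v ∈ xs then some (s + (xs.idxOf v : Int)) else none := by
  induction xs with
  | nil =>
    intro s d v
    simp only [PySem.List.enumerate_nil, List.foldl_nil]
    cases d.get? v <;> simp
  | cons x xs ih =>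
    intro s d v
    rw [PySem.List.enumerate_cons]
    simp only [List.foldl_cons]
    rw [ih]
    by_cases hvx : v = x
    · subst hvx
      cases hd : d.get? v with
      | some w =>
        have hc : d.contains v = true := by
          rw [PySem.Dict.contains_eq_isSome_get?, hd]; rfl
        simp [PySem.Dict.setdefault, hc, hd]
      | none =>
        have hc : ¬ d.contains v = true := by
          rw [PySem.Dict.contains_eq_isSome_get?, hd]; simp
        have hset : (d.setdefault v s).get? v = some s := by
          simp only [PySem.Dict.setdefault, if_neg hc]
          exact azzDup_get?_append_self d.items v s hd
        rw [hset]
        simp [List.idxOf_cons_self]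
    · have hget : (d.setdefault x s).get? v = d.get? v := by
        simp only [PySem.Dict.setdefault]
        split
        · rfl
        · exact azzDup_get?_append_of_ne d.items x s v hvx
      rw [hget]
      cases d.get? v with
      | some w => rfl
      | none =>
        simp only [List.mem_cons, hvx, false_or]
        by_cases hm : v ∈ xs
        · simp only [if_pos hm]
          rw [List.idxOf_cons_ne _ (fun h => hvx h.symm)]
          congr 1
          push_cast
          omega
        · simp [hm]

-- B's map function, rewritten through the table characterization, equals the reference recursion
theorem azzDup_map_eq (L1 : List Int) (xs : List Int) : ∀ (pre : List Int), pre ++ xs = L1 →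
    (PySem.List.enumerate xs (pre.length : Int)).map
      (fun p => if (if p.2 ∈ L1 then some ((L1.idxOf p.2 : Nat) : Int) else none) = some p.1 then p.2 else 0)
      = azzDupGo pre xs := by
  induction xs with
  | nil => intro pre _; simp [PySem.List.enumerate_nil, azzDupGo]
  | cons x xs ih =>
    intro pre hL
    rw [PySem.List.enumerate_cons]
    simp only [List.map_cons, azzDupGo]
    have hmem : x ∈ L1 := by rw [← hL]; simp
    have htail : (PySem.List.enumerate xs ((pre.length : Int) + 1)).map
        (fun p => if (if p.2 ∈ L1 then some ((L1.idxOf p.2 : Nat) : Int) else none) = some p.1 then p.2 else 0)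
        = azzDupGo (pre ++ [x]) xs := by
      have := ih (pre ++ [x]) (by rw [← hL]; simp)
      rw [← this]
      have harg : ((pre ++ [x]).length : Int) = (pre.length : Int) + 1 := by
        simp
      rw [harg]
    rw [htail]
    congr 1
    by_cases hp : x ∈ pre
    · have hidx : L1.idxOf x = pre.idxOf x := by
        rw [← hL, List.idxOf_append, if_pos hp]
      have hlt : pre.idxOf x < pre.length := List.idxOf_lt_length_of_mem hp
      rw [if_pos hp, if_pos hmem, if_neg]
      intro hcontra
      have : ((L1.idxOf x : Nat) : Int) = (pre.length : Int) := Option.some.injEq _ _ ▸ hcontra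
      rw [hidx] at this
      omega
    · have hidx : L1.idxOf x = pre.length := by
        rw [← hL, List.idxOf_append, if_neg hp, List.idxOf_cons_self]
        omega
      rw [if_neg hp, if_pos hmem, if_pos (by rw [hidx])]

theorem azzDup_alt_eq_go (L1 : List Int) : azzera_duplicati_alt L1 = azzDupGo [] L1 := by
  have hfirst : ∀ v, (azzDupFirst L1).get? v
      = if v ∈ L1 then some ((L1.idxOf v : Nat) : Int) else none := by
    intro v
    unfold azzDupFirst
    rw [azzDup_fold_setdefault_get?]
    simp [PySem.Dict.get?_empty]
  unfold azzera_duplicati_alt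
  show (PySem.List.enumerate L1).map
      (fun p => if (azzDupFirst L1).get? p.2 = some p.1 then p.2 else 0) = azzDupGo [] L1
  have hfun : (fun p : Int × Int => if (azzDupFirst L1).get? p.2 = some p.1 then p.2 else 0)
      = (fun p : Int × Int => if (if p.2 ∈ L1 then some ((L1.idxOf p.2 : Nat) : Int) else none) = some p.1 then p.2 else 0) := by
    funext p
    rw [hfirst]
  rw [hfun]
  have := azzDup_map_eq L1 L1 [] (by simp)
  simpa using this

-- ===== VERDICT (by name: the statement is the Claim_ definition above) =====
theorem azzera_duplicati_spec : Claim_equal_azzera_duplicati := by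
  intro L1 _
  unfold Spec_azzera_duplicati azzera_duplicati
  rw [azzDup_alt_eq_go, azzDup_foldl_eq L1 [] [] (by simp) (by simp)]
  simp
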